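-- pv_equiv track=rewrite | github.com/aim123/ENN-ENN-Training-V2 | experimenthost/util/bucket_name_filter.py | filter_invalid_characters
-- ===== SOURCE A (Python) =====
-- def filter_invalid_characters(string):
--     """
--     Replaces any invalid characters with dashes
--     """
--     valid_chars = "abcdefghijklmnopqrstuvwxyz0123456789-."
--     newstring = ""
--     for char in string:
--         use_char = char
--         if char not in valid_chars:
--             use_char = '-'
--         newstring = newstring + use_char
--
--     return newstring
-- ===== SOURCE B (Python) =====
-- import re
--
-- def filter_invalid_characters(string):
--     """
--     Replaces any invalid characters with dashes
--     """
--     return re.sub(r'[^a-z0-9.\-]', '-', string)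
-- ===== Notes on version B (the rewrite author's own statement) =====
-- stated objective: idiomatic
-- what changed: replaces the char-by-char loop with quadratic string concatenation and a linear scan of the valid-character string by a single regex substitution over the complement character class
import Mathlib
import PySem

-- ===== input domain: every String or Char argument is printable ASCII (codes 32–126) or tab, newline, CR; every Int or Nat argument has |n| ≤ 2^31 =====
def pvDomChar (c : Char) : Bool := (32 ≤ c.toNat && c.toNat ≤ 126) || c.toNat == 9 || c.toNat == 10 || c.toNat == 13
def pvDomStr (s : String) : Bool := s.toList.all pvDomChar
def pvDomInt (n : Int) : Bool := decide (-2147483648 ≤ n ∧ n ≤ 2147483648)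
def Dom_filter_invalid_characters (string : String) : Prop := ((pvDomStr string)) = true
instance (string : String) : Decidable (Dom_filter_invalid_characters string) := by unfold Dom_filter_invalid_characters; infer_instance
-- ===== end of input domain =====

-- B replaces A's char-by-char accumulation loop (with a membership scan of the
-- valid-character string) by a single regex substitution over the complement
-- character class; objective: idiomatic.


-- ===== PORT A =====
-- valid_chars = "abcdefghijklmnopqrstuvwxyz0123456789-."
def pvValidCharsA : List Char := "abcdefghijklmnopqrstuvwxyz0123456789-.".toList

-- the loop body: use_char = char; if char not in valid_chars: use_char = '-'; newstring += use_char
def filter_invalid_characters (string : String) : String :=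
  String.ofList (string.toList.foldl
    (fun newstring char =>
      let use_char := char
      let use_char := if pvValidCharsA.contains char = false then '-' else use_char
      newstring ++ [use_char])
    [])

-- ===== PORT B =====
-- the regex character class [^a-z0-9.\-] matched against one character
def pvInvalidClassB (c : Char) : Bool :=
  !(('a' ≤ c && c ≤ 'z') || ('0' ≤ c && c ≤ '9') || c == '.' || c == '-')

-- re.sub(r'[^a-z0-9.\-]', '-', string): replace every class match by '-'
def filter_invalid_characters_alt (string : String) : String :=
  String.ofList (string.toList.map (fun c => if pvInvalidClassB c then '-' else c))

-- ===== PRECONDITION & SPEC =====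
def Spec_filter_invalid_characters (string : String) (out : String) : Prop := out = filter_invalid_characters_alt string
instance (string : String) (out : String) : Decidable (Spec_filter_invalid_characters string out) := by unfold Spec_filter_invalid_characters; infer_instance

-- ===== CLAIM (what is proved, stated in full; the proofs are below) =====
def Claim_equal_filter_invalid_characters : Prop := ∀ (string : String), Dom_filter_invalid_characters string → Spec_filter_invalid_characters string (filter_invalid_characters string)

-- ===== LEMMAS AND PROOFS =====

-- pointwise agreement of the two per-character decisions, for chars with code < 127
set_option maxRecDepth 4000 in
theorem pv_point (c : Char) (h : c.toNat < 127) :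
    (if pvValidCharsA.contains c = false then '-' else c)
      = (if pvInvalidClassB c then '-' else c) := by
  have key : ∀ n : Nat, n < 127 →
      (if pvValidCharsA.contains (Char.ofNat n) = false then '-' else Char.ofNat n)
        = (if pvInvalidClassB (Char.ofNat n) then '-' else Char.ofNat n) := by decide
  have := key c.toNat h
  simpa [Char.ofNat_toNat] using this

theorem filter_invalid_characters_spec : Claim_equal_filter_invalid_characters := by
  intro s hdom
  unfold Spec_filter_invalid_characters filter_invalid_characters filter_invalid_characters_alt
  rw [PySem.List.foldl_append_singleton_eq_map]
  simp only [List.nil_append]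
  congr 1
  apply List.map_congr_left
  intro c hc
  have hd : pvDomChar c = true := by
    have : s.toList.all pvDomChar = true := hdom
    exact List.all_eq_true.mp this c hc
  have hlt : c.toNat < 127 := by
    simp only [pvDomChar, Bool.or_eq_true, Bool.and_eq_true, decide_eq_true_eq, beq_iff_eq] at hd
    omega
  simpa using pv_point c hlt

-- ===== VERDICT (by name: the statement is the Claim_ definition above) =====
-- (theorem above is the verdict; restated here per layout)
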